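-- pv_equiv track=rewrite | github.com/ThriceInATrice/advent_of_code_2024 | dec_4th/dec_4th.py | get_descending_diagonals
-- ===== SOURCE A (Python) =====
-- def get_descending_diagonals(char_matrix):
--     """this function returns a list of the characters along each diagonal line in the
--     orginal character matrix descending refers to the fact that the lines start in the
--     top left and descend to the bottom right
--     """
--     diagonals = []
--     for start in [(0, i) for i in range(len(char_matrix))] + [
--         (i, 0) for i in range(1, len(char_matrix))
--     ]:
--         y, x = start
--         line = []
--         while 0 <= x < len(char_matrix) and 0 <= y < len(char_matrix):
--             line.append(char_matrix[y][x])
--             x += 1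
--             y += 1
--         diagonals.append(line)
--     return diagonals
-- ===== SOURCE B (Python) =====
-- def get_descending_diagonals(char_matrix):
--     """Single row-major pass bucketing each cell by its diagonal index d = x - y,
--     then emitting buckets in the original order: d = 0..n-1, then d = -1..-(n-1)."""
--     n = len(char_matrix)
--     buckets = {}
--     for y in range(n):
--         for x in range(n):
--             buckets.setdefault(x - y, []).append(char_matrix[y][x])
--     return [buckets.get(d, []) for d in range(n)] + [
--         buckets.get(-d, []) for d in range(1, n)
--     ]
-- ===== Notes on version B (the rewrite author's own statement) =====
-- stated objective: alternative
-- what changed: Instead of walking each diagonal from its start cell with a while-loop, B makes one row-major pass over the n x n square, bucketing every cell by its diagonal index d = x - y in a dict, then emits the buckets in A's order (d = 0..n-1, then d = -1..-(n-1)).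
import Mathlib
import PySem

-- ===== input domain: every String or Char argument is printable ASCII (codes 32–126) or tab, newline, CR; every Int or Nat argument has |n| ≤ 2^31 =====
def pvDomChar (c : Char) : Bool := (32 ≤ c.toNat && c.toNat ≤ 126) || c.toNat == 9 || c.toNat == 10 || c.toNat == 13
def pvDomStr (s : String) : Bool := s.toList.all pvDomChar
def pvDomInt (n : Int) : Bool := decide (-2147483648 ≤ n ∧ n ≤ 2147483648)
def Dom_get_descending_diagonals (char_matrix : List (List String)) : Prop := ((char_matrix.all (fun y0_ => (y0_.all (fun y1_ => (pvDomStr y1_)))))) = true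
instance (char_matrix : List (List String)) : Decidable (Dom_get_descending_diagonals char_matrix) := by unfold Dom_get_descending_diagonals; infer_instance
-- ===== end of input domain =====

-- B buckets cells by diagonal in one row-major pass instead of walking each diagonal (alternative decomposition, same cost).

-- ===== PORT A =====
-- the while-loop of A: walks down-right from (y, x) while both indices are inside the n×n square;
-- char_matrix[y][x] is ported with pyGetD defaults, exact under Pre_ (every visited index is in range)
def pvWalkA (char_matrix : List (List String)) (y x : Int) (line : List String) : List String :=
  if 0 ≤ x ∧ x < (char_matrix.length : Int) ∧ 0 ≤ y ∧ y < (char_matrix.length : Int) then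
    pvWalkA char_matrix (y + 1) (x + 1)
      (line ++ [PySem.List.pyGetD (PySem.List.pyGetD char_matrix y []) x ""])
  else line
termination_by ((char_matrix.length : Int) - y).toNat
decreasing_by omega

def get_descending_diagonals (char_matrix : List (List String)) : List (List String) :=
  let n : Int := (char_matrix.length : Int)
  let starts : List (Int × Int) :=
    ((PySem.List.pyRange 0 n 1).map (fun i => ((0 : Int), i))) ++
    ((PySem.List.pyRange 1 n 1).map (fun i => (i, (0 : Int))))
  starts.foldl (fun diagonals s => diagonals ++ [pvWalkA char_matrix s.1 s.2 []]) []

-- ===== PORT B =====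
-- buckets.setdefault(x - y, []).append(v) is Dict.modify (x - y) [] (· ++ [v]); indexing via pyGetD, exact under Pre_
def get_descending_diagonals_alt (char_matrix : List (List String)) : List (List String) :=
  let n : Int := (char_matrix.length : Int)
  let buckets : PySem.Dict Int (List String) :=
    (PySem.List.pyRange 0 n 1).foldl (fun b y =>
      (PySem.List.pyRange 0 n 1).foldl (fun b x =>
        b.modify (x - y) [] (· ++ [PySem.List.pyGetD (PySem.List.pyGetD char_matrix y []) x ""])) b)
      PySem.Dict.empty
  ((PySem.List.pyRange 0 n 1).map (fun d => buckets.getD d [])) ++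
  ((PySem.List.pyRange 1 n 1).map (fun d => buckets.getD (-d) []))

-- ===== PRECONDITION & SPEC =====
-- Pre_: exactly the inputs where Python A returns (A reads every cell of the n×n square, n = number of rows;
-- it raises IndexError iff some row is shorter than n)
def Pre_get_descending_diagonals (char_matrix : List (List String)) : Prop :=
  ∀ row ∈ char_matrix, char_matrix.length ≤ row.length
instance (char_matrix : List (List String)) : Decidable (Pre_get_descending_diagonals char_matrix) := by
  unfold Pre_get_descending_diagonals; infer_instance
def pvWitness_get_descending_diagonals : List (List String) := [["a", "b"], ["c", "d"]]

def Spec_get_descending_diagonals (char_matrix : List (List String)) (out : List (List String)) : Prop := out = get_descending_diagonals_alt char_matrix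
instance (char_matrix : List (List String)) (out : List (List String)) : Decidable (Spec_get_descending_diagonals char_matrix out) := by unfold Spec_get_descending_diagonals; infer_instance

-- ===== CLAIM (what is proved, stated in full; the proofs are below) =====
def Claim_equal_get_descending_diagonals : Prop := ∀ (char_matrix : List (List String)), Dom_get_descending_diagonals char_matrix → Pre_get_descending_diagonals char_matrix → Spec_get_descending_diagonals char_matrix (get_descending_diagonals char_matrix)

-- ===== LEMMAS AND PROOFS =====

-- the cells of diagonal c (top-left to bottom-right), shared normal form of both sides
def pvDiag (m : List (List String)) (c : Int) : List String :=
  (PySem.List.pyRange 0 (m.length : Int) 1).flatMap (fun y =>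
    if 0 ≤ y + c ∧ y + c < (m.length : Int) then
      [PySem.List.pyGetD (PySem.List.pyGetD m y []) (y + c) ""] else [])

lemma pv_filter_eq_single (a b t : Int) :
    (PySem.List.pyRange a b 1).filter (fun x => x == t) =
      if a ≤ t ∧ t < b then [t] else [] := by
  by_cases hab : a < b
  · rw [PySem.List.pyRange_one_cons hab]
    by_cases hat : a = t
    · subst hat
      simp only [List.filter_cons, beq_self_eq_true, if_pos]
      rw [pv_filter_eq_single (a + 1) b a]
      have h2 : a ≤ a ∧ a < b := by omega
      simp [h2]
    · have hbeq : (a == t) = false := by simp [hat]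
      simp only [List.filter_cons, hbeq, Bool.false_eq_true, if_false]
      rw [pv_filter_eq_single (a + 1) b t]
      exact if_congr (by omega) rfl rfl
  · rw [PySem.List.pyRange_one_eq_nil (by omega)]
    have : ¬ (a ≤ t ∧ t < b) := by omega
    simp [this]
termination_by (b - a).toNat
decreasing_by all_goals omega

-- A's while-loop from (y, x) collects exactly the diagonal cells for rows y.. (c = x - y)
lemma pvWalkA_eq_aux (m : List (List String)) :
    ∀ (k : Nat) (y x : Int) (line : List String), 0 ≤ y → 0 ≤ x →
    k = (((m.length : Int)) - y).toNat →
    pvWalkA m y x line = line ++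
      (PySem.List.pyRange y (m.length : Int) 1).flatMap (fun yy =>
        if 0 ≤ yy + (x - y) ∧ yy + (x - y) < (m.length : Int) then
          [PySem.List.pyGetD (PySem.List.pyGetD m yy []) (yy + (x - y)) ""] else []) := by
  intro k
  induction k with
  | zero =>
    intro y x line hy hx hk
    rw [pvWalkA, if_neg (by omega), PySem.List.pyRange_one_eq_nil (by omega)]
    simp
  | succ k ih =>
    intro y x line hy hx hk
    rw [pvWalkA]
    by_cases hcond : 0 ≤ x ∧ x < (m.length : Int) ∧ 0 ≤ y ∧ y < (m.length : Int)
    · rw [if_pos hcond]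
      rw [ih (y + 1) (x + 1) _ (by omega) (by omega) (by omega)]
      have hxy : x + 1 - (y + 1) = x - y := by ring
      simp only [hxy]
      rw [PySem.List.pyRange_one_cons (show y < (m.length : Int) by omega)]
      simp only [List.flatMap_cons]
      rw [if_pos (show 0 ≤ y + (x - y) ∧ y + (x - y) < (m.length : Int) by omega)]
      have he : y + (x - y) = x := by ring
      rw [he]
      simp [List.append_assoc]
    · rw [if_neg hcond]
      have hnil : ∀ yy ∈ PySem.List.pyRange y (m.length : Int) 1,
          (if 0 ≤ yy + (x - y) ∧ yy + (x - y) < (m.length : Int) then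
            [PySem.List.pyGetD (PySem.List.pyGetD m yy []) (yy + (x - y)) ""] else []) = ([] : List String) := by
        intro yy hyy
        rw [PySem.List.mem_pyRange_one] at hyy
        rw [if_neg (by omega)]
      rw [List.flatMap_eq_nil_iff.mpr hnil, List.append_nil]

lemma pvWalkA_eq (m : List (List String)) (y x : Int) (line : List String)
    (hy : 0 ≤ y) (hx : 0 ≤ x) :
    pvWalkA m y x line = line ++
      (PySem.List.pyRange y (m.length : Int) 1).flatMap (fun yy =>
        if 0 ≤ yy + (x - y) ∧ yy + (x - y) < (m.length : Int) then
          [PySem.List.pyGetD (PySem.List.pyGetD m yy []) (yy + (x - y)) ""] else []) :=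
  pvWalkA_eq_aux m (((m.length : Int)) - y).toNat y x line hy hx rfl

-- one inner (row) pass adds row y's single diagonal-c cell to bucket c
lemma pv_row_getD (m : List (List String)) (y c : Int) (b : PySem.Dict Int (List String)) :
    ((PySem.List.pyRange 0 (m.length : Int) 1).foldl (fun b x =>
        b.modify (x - y) [] (· ++ [PySem.List.pyGetD (PySem.List.pyGetD m y []) x ""])) b).getD c [] =
      b.getD c [] ++
      (if 0 ≤ y + c ∧ y + c < (m.length : Int) then
        [PySem.List.pyGetD (PySem.List.pyGetD m y []) (y + c) ""] else []) := by
  have hfold : (PySem.List.pyRange 0 (m.length : Int) 1).foldl (fun b x =>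
        b.modify (x - y) [] (· ++ [PySem.List.pyGetD (PySem.List.pyGetD m y []) x ""])) b =
      ((PySem.List.pyRange 0 (m.length : Int) 1).map
        (fun x => (x - y, PySem.List.pyGetD (PySem.List.pyGetD m y []) x ""))).foldl
        (fun d p => d.modify p.1 [] (· ++ [p.2])) b := by
    rw [List.foldl_map]
  rw [hfold, PySem.Dict.getD_foldl_modify_append]
  congr 1
  rw [List.filter_map]
  have hcongr : (PySem.List.pyRange 0 (m.length : Int) 1).filter
      ((fun p => p.1 == c) ∘ (fun x => (x - y, PySem.List.pyGetD (PySem.List.pyGetD m y []) x ""))) =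
      (PySem.List.pyRange 0 (m.length : Int) 1).filter (fun x => x == y + c) := by
    apply List.filter_congr
    intro x hx
    have : (x - y = c) ↔ (x = y + c) := by omega
    simp [Function.comp, this]
  rw [hcongr, pv_filter_eq_single]
  by_cases h : 0 ≤ y + c ∧ y + c < (m.length : Int)
  · rw [if_pos h, if_pos (by omega)]; simp
  · rw [if_neg h, if_neg (by omega)]; simp

-- the whole double loop: bucket c holds the diagonal-c cells of the processed rows, in row order
lemma pv_rows_getD (m : List (List String)) (c : Int) :
    ∀ (ys : List Int) (b : PySem.Dict Int (List String)),
    ((ys.foldl (fun b y => (PySem.List.pyRange 0 (m.length : Int) 1).foldl (fun b x =>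
        b.modify (x - y) [] (· ++ [PySem.List.pyGetD (PySem.List.pyGetD m y []) x ""])) b) b)).getD c [] =
      b.getD c [] ++ ys.flatMap (fun y =>
        if 0 ≤ y + c ∧ y + c < (m.length : Int) then
          [PySem.List.pyGetD (PySem.List.pyGetD m y []) (y + c) ""] else []) := by
  intro ys
  induction ys with
  | nil => intro b; simp
  | cons y ys ih =>
    intro b
    simp only [List.foldl_cons, List.flatMap_cons]
    rw [ih, pv_row_getD, List.append_assoc]

lemma pv_bucket_eq (m : List (List String)) (c : Int) :
    (((PySem.List.pyRange 0 (m.length : Int) 1).foldl (fun b y =>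
      (PySem.List.pyRange 0 (m.length : Int) 1).foldl (fun b x =>
        b.modify (x - y) [] (· ++ [PySem.List.pyGetD (PySem.List.pyGetD m y []) x ""])) b)
      PySem.Dict.empty)).getD c [] = pvDiag m c := by
  rw [pv_rows_getD, pvDiag]
  simp [PySem.Dict.getD_empty]

lemma pvWalkA_upper (m : List (List String)) (i : Int) (hi : 0 ≤ i) :
    pvWalkA m 0 i [] = pvDiag m i := by
  rw [pvWalkA_eq m 0 i [] le_rfl hi, pvDiag]
  simp

lemma pvWalkA_lower (m : List (List String)) (i : Int) (hi0 : 0 < i) (hin : i ≤ (m.length : Int)) :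
    pvWalkA m i 0 [] = pvDiag m (-i) := by
  rw [pvWalkA_eq m i 0 [] (by omega) le_rfl, pvDiag]
  rw [PySem.List.pyRange_one_append 0 i (m.length : Int) (by omega) hin, List.flatMap_append]
  have h1 : (PySem.List.pyRange 0 i 1).flatMap (fun y =>
      if 0 ≤ y + (-i) ∧ y + (-i) < (m.length : Int) then
        [PySem.List.pyGetD (PySem.List.pyGetD m y []) (y + (-i)) ""] else []) = [] := by
    apply List.flatMap_eq_nil_iff.mpr
    intro y hy
    rw [PySem.List.mem_pyRange_one] at hy
    rw [if_neg (by omega)]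
  rw [h1, List.nil_append, List.nil_append]
  simp only [zero_sub]

-- ===== VERDICT (by name: the statement is the Claim_ definition above) =====
theorem get_descending_diagonals_spec : Claim_equal_get_descending_diagonals := by
  intro m _ _
  unfold Spec_get_descending_diagonals get_descending_diagonals get_descending_diagonals_alt
  simp only
  rw [PySem.List.foldl_append_singleton_eq_map]
  rw [List.map_append, List.map_map, List.map_map]
  simp only [List.nil_append]
  congr 1
  · apply List.map_congr_left
    intro i hi
    rw [PySem.List.mem_pyRange_one] at hi
    show pvWalkA m 0 i [] = _
    rw [pvWalkA_upper m i (by omega), ← pv_bucket_eq]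
  · apply List.map_congr_left
    intro i hi
    rw [PySem.List.mem_pyRange_one] at hi
    show pvWalkA m i 0 [] = _
    rw [pvWalkA_lower m i (by omega) (by omega), ← pv_bucket_eq]
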